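-- pv_equiv track=rewrite | github.com/Cedricverl/1010- | Block.py | are_equivalent
-- ===== SOURCE A (Python) =====
-- def get_most_central_dot(block):
--     """returns the most central dot in a block wich is always the same for each block no matter the anchor"""
--     sum_x = 0
--     sum_y = 0
--     for dot in block:
--         sum_x += dot[0]
--         sum_y += dot[1]
--     average_x = sum_x//len(block)
--     average_y = sum_y//len(block)
--     return average_x, average_y
--
-- def are_equivalent(block, other_block):
--     """
--        Check whether the given blocks are equivalent, i.e. cover equivalent
--        chains of dots.
--        - A block is equivalent with some other block , if there exists a position
--          for the anchor of the one block such that the set of dots covered by that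
--          block relative towards that anchor position, is identical to the set of
--          dots covered by the other block.
--         ASSUMPTIONS
--         - Both given blocks are proper blocks.
--     """
--     other_block_edit = other_block.copy()
--     other_block_moved = set()
--     # if block positions are equivalent:
--     if block == other_block:
--         return True
--
--     # if block positions are not equivalent (but relatively the same):
--     elif len(block) == len(other_block):
--         central_dot, central_other_dot = get_most_central_dot(block), get_most_central_dot(other_block)
--         x_offset, y_offset = central_other_dot[0] - central_dot[0], central_other_dot[1] - central_dot[1]
--
--         # translate other_block until both central_dots matches
--         for dot in other_block_edit:
--             other_block_moved.add((dot[0] - x_offset, dot[1] - y_offset),)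
--
--         if other_block_moved == block:
--             return True
--         else:
--             return False
-- ===== SOURCE B (Python) =====
-- def are_equivalent(block, other_block):
--     # Normalize each block (a set of dots) to its bounding-box corner and compare the
--     # normalized dot sets, instead of translating one block onto the other's centroid.
--     if block == other_block:
--         return True
--     if len(block) == len(other_block):
--         def _norm(b):
--             mx = min(x for x, _ in b)
--             my = min(y for _, y in b)
--             return {(x - mx, y - my) for x, y in b}
--         return _norm(block) == _norm(other_block)
--     # sizes differ: fall through like A (returns None)
-- ===== Notes on version B (the rewrite author's own statement) =====
-- stated objective: simpler
-- what changed: B normalizes each dot set by subtracting its own min-x/min-y bounding-box corner and compares the two normalized sets, instead of A's computing both floordiv centroids, translating a copy of other_block by the centroid offset and comparing the moved set against block.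
-- outside the precondition, e.g. on are_equivalent({(0, 0)}, set()): A returns None, B returns None
import Mathlib
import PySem

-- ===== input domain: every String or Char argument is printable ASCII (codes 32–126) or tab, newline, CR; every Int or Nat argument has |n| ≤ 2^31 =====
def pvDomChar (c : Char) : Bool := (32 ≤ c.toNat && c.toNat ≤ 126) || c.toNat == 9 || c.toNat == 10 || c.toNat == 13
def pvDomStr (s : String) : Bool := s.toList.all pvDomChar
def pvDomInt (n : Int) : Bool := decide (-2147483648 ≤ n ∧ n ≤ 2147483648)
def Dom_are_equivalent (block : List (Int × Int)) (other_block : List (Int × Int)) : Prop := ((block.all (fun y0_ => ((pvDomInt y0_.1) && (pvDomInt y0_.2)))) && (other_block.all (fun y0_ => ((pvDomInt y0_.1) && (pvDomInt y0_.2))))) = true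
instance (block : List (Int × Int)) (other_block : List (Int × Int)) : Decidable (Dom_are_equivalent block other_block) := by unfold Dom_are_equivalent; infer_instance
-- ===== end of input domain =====

-- B compares min-corner-normalized dot sets instead of A's centroid-offset translation of a copy;
-- objective: simpler. Both arguments are Python SETS of dots, encoded as duplicate-free lists.

-- ===== PORT A =====
def get_most_central_dot (block : List (Int × Int)) : Int × Int :=
  -- iterating a set to SUM its coordinates is order-independent, so the list fold is exact
  let sum_x := block.foldl (fun s d => s + d.1) 0
  let sum_y := block.foldl (fun s d => s + d.2) 0
  -- len(block) ≠ 0 at every call reached under Pre_ (equal-size non-equal sets are nonempty)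
  (PySem.Int.floordiv sum_x (PySem.Set.len block), PySem.Int.floordiv sum_y (PySem.Set.len block))

def are_equivalent (block : List (Int × Int)) (other_block : List (Int × Int)) : Bool :=
  let other_block_edit := other_block  -- .copy()
  if PySem.Set.equal block other_block then true
  else if PySem.Set.len block == PySem.Set.len other_block then
    let central_dot := get_most_central_dot block
    let central_other_dot := get_most_central_dot other_block
    let x_offset := central_other_dot.1 - central_dot.1
    let y_offset := central_other_dot.2 - central_dot.2
    let moved := other_block_edit.foldl
      (fun s d => PySem.Set.add s (d.1 - x_offset, d.2 - y_offset)) PySem.Set.empty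
    if PySem.Set.equal moved block then true else false
  else false  -- Python falls off the function and returns None here; excluded by Pre_

-- ===== PORT B =====
-- b is nonempty at every call (guards in are_equivalent_alt), so getD 0 is never used.
def bNorm (b : List (Int × Int)) : PySem.Set (Int × Int) :=
  let mx := (PySem.List.min? (b.map Prod.fst) (fun x => x)).getD 0
  let my := (PySem.List.min? (b.map Prod.snd) (fun y => y)).getD 0
  PySem.Set.ofList (b.map (fun p => (p.1 - mx, p.2 - my)))

def are_equivalent_alt (block : List (Int × Int)) (other_block : List (Int × Int)) : Bool :=
  if PySem.Set.equal block other_block then true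
  else if PySem.Set.len block == PySem.Set.len other_block then
    PySem.Set.equal (bNorm block) (bNorm other_block)
  else false  -- Python falls through returning None here; excluded by Pre_

-- ===== PRECONDITION & SPEC =====
-- The arguments are Python sets, so their list encodings are duplicate-free (Nodup); Pre_ further
-- excludes sets of unequal size, where A falls off the function and returns None (not a bool).
def Pre_are_equivalent (block : List (Int × Int)) (other_block : List (Int × Int)) : Prop :=
  block.Nodup ∧ other_block.Nodup ∧ block.length = other_block.length
instance (block : List (Int × Int)) (other_block : List (Int × Int)) : Decidable (Pre_are_equivalent block other_block) := by unfold Pre_are_equivalent; infer_instance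
def pvWitness_are_equivalent : (List (Int × Int)) × (List (Int × Int)) := ([(0, 0), (1, 0)], [(4, 5), (5, 5)])

def Spec_are_equivalent (block : List (Int × Int)) (other_block : List (Int × Int)) (out : Bool) : Prop := out = are_equivalent_alt block other_block
instance (block : List (Int × Int)) (other_block : List (Int × Int)) (out : Bool) : Decidable (Spec_are_equivalent block other_block out) := by unfold Spec_are_equivalent; infer_instance

-- ===== CLAIM (what is proved, stated in full; the proofs are below) =====
def Claim_equal_are_equivalent : Prop := ∀ (block : List (Int × Int)) (other_block : List (Int × Int)), Dom_are_equivalent block other_block → Pre_are_equivalent block other_block → Spec_are_equivalent block other_block (are_equivalent block other_block)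

-- ===== LEMMAS AND PROOFS =====
-- shifting every dot of block by (dx, dy) gives exactly the dots of other_block (as sets)
def pvTrans (block other_block : List (Int × Int)) (dx dy : Int) : Prop :=
  (∀ p ∈ block, (p.1 + dx, p.2 + dy) ∈ other_block) ∧
  (∀ q ∈ other_block, (q.1 - dx, q.2 - dy) ∈ block)

theorem min_id_spec (xs : List Int) (hxs : xs ≠ []) :
    ((PySem.List.min? xs (fun x => x)).getD 0 ∈ xs) ∧
      (∀ y ∈ xs, (PySem.List.min? xs (fun x => x)).getD 0 ≤ y) := by
  cases h : PySem.List.min? xs (fun x => x) with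
  | none => exact absurd ((PySem.List.min?_eq_none_iff xs (fun x => x)).mp h) hxs
  | some m =>
    simp only [Option.getD_some]
    exact ⟨PySem.List.min?_mem h, PySem.List.min?_isMin h⟩

-- abbreviations for the two minimum coordinates used by bNorm
def pvMinX (b : List (Int × Int)) : Int := (PySem.List.min? (b.map Prod.fst) (fun x => x)).getD 0
def pvMinY (b : List (Int × Int)) : Int := (PySem.List.min? (b.map Prod.snd) (fun y => y)).getD 0

theorem bNorm_eq (b : List (Int × Int)) :
    bNorm b = PySem.Set.ofList (b.map (fun p => (p.1 - pvMinX b, p.2 - pvMinY b))) := rfl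

theorem minX_spec (b : List (Int × Int)) (hb : b ≠ []) :
    (∃ p ∈ b, p.1 = pvMinX b) ∧ (∀ p ∈ b, pvMinX b ≤ p.1) := by
  have h := min_id_spec (b.map Prod.fst) (by simpa using hb)
  unfold pvMinX
  constructor
  · obtain ⟨p, hp, he⟩ := List.mem_map.mp h.1
    exact ⟨p, hp, he⟩
  · exact fun p hp => h.2 p.1 (List.mem_map_of_mem hp)

theorem minY_spec (b : List (Int × Int)) (hb : b ≠ []) :
    (∃ p ∈ b, p.2 = pvMinY b) ∧ (∀ p ∈ b, pvMinY b ≤ p.2) := by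
  have h := min_id_spec (b.map Prod.snd) (by simpa using hb)
  unfold pvMinY
  constructor
  · obtain ⟨p, hp, he⟩ := List.mem_map.mp h.1
    exact ⟨p, hp, he⟩
  · exact fun p hp => h.2 p.2 (List.mem_map_of_mem hp)

-- the heart of B: translation-equivalence of the dot sets ↔ equal min-corner normalizations
theorem trans_iff_norm (b o : List (Int × Int)) (hb : b ≠ []) (ho : o ≠ []) :
    (∃ dx dy, pvTrans b o dx dy) ↔ PySem.Set.equal (bNorm b) (bNorm o) = true := by
  rw [PySem.Set.equal_iff, bNorm_eq, bNorm_eq]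
  simp only [PySem.Set.mem_ofList, List.mem_map]
  constructor
  · rintro ⟨dx, dy, h1, h2⟩
    -- the min corner of o is the min corner of b shifted by (dx, dy)
    have hxo : pvMinX o = pvMinX b + dx := by
      obtain ⟨⟨pb, hpb, hpbx⟩, hbmin⟩ := minX_spec b hb
      obtain ⟨⟨qo, hqo, hqox⟩, homin⟩ := minX_spec o ho
      have h₁ := homin _ (h1 pb hpb)
      have h₂ := hbmin _ (h2 qo hqo)
      simp only at h₁ h₂
      omega
    have hyo : pvMinY o = pvMinY b + dy := by
      obtain ⟨⟨pb, hpb, hpby⟩, hbmin⟩ := minY_spec b hb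
      obtain ⟨⟨qo, hqo, hqoy⟩, homin⟩ := minY_spec o ho
      have h₁ := homin _ (h1 pb hpb)
      have h₂ := hbmin _ (h2 qo hqo)
      simp only at h₁ h₂
      omega
    intro r
    constructor
    · rintro ⟨p, hp, rfl⟩
      exact ⟨(p.1 + dx, p.2 + dy), h1 p hp, by simp only [hxo, hyo, Prod.mk.injEq]; omega⟩
    · rintro ⟨q, hq, rfl⟩
      exact ⟨(q.1 - dx, q.2 - dy), h2 q hq, by simp only [hxo, hyo, Prod.mk.injEq]; omega⟩
  · intro hmem
    refine ⟨pvMinX o - pvMinX b, pvMinY o - pvMinY b, ?_, ?_⟩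
    · intro p hp
      obtain ⟨⟨q1, q2⟩, hq, he⟩ := (hmem (p.1 - pvMinX b, p.2 - pvMinY b)).mp ⟨p, hp, rfl⟩
      rw [Prod.mk.injEq] at he
      have : (p.1 + (pvMinX o - pvMinX b), p.2 + (pvMinY o - pvMinY b)) = (q1, q2) := by
        rw [Prod.mk.injEq]; omega
      rw [this]; exact hq
    · intro q hq
      obtain ⟨⟨p1, p2⟩, hp, he⟩ := (hmem (q.1 - pvMinX o, q.2 - pvMinY o)).mpr ⟨q, hq, rfl⟩
      rw [Prod.mk.injEq] at he
      have : (q.1 - (pvMinX o - pvMinX b), q.2 - (pvMinY o - pvMinY b)) = (p1, p2) := by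
        rw [Prod.mk.injEq]; omega
      rw [this]; exact hp

-- A's moved set equals block ↔ the offset is a translation of block's dots onto other_block's
theorem moved_equal_iff (b o : List (Int × Int)) (dx dy : Int) :
    PySem.Set.equal
        (o.foldl (fun s d => PySem.Set.add s (d.1 - dx, d.2 - dy)) PySem.Set.empty) b = true ↔
      pvTrans b o dx dy := by
  rw [PySem.Set.equal_iff]
  constructor
  · intro h
    refine ⟨fun p hp => ?_, fun q hq => ?_⟩
    · have hm := (h p).mpr hp
      rw [PySem.Set.mem_foldl_add] at hm
      rcases hm with h0 | ⟨⟨q1, q2⟩, hq, he⟩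
      · simp [PySem.Set.empty] at h0
      · rw [Prod.mk.injEq] at he
        have : (p.1 + dx, p.2 + dy) = (q1, q2) := by rw [Prod.mk.injEq]; omega
        rw [this]; exact hq
    · have hm : (q.1 - dx, q.2 - dy) ∈
          o.foldl (fun s d => PySem.Set.add s (d.1 - dx, d.2 - dy)) PySem.Set.empty :=
        (PySem.Set.mem_foldl_add o _ _ _).mpr (Or.inr ⟨q, hq, rfl⟩)
      exact (h _).mp hm
  · rintro ⟨h1, h2⟩ x
    rw [PySem.Set.mem_foldl_add]
    constructor
    · rintro (h0 | ⟨q, hq, rfl⟩)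
      · simp [PySem.Set.empty] at h0
      · exact h2 q hq
    · intro hx
      refine Or.inr ⟨(x.1 + dx, x.2 + dy), h1 x hx, ?_⟩
      rw [Prod.mk.injEq]; omega

-- element sums transform exactly under a translation between equal nodup dot sets
theorem sum_shift (b o : List (Int × Int)) (hb : b.Nodup) (ho : o.Nodup) (dx dy : Int)
    (ht : pvTrans b o dx dy) :
    (o.map Prod.fst).sum = (b.map Prod.fst).sum + b.length * dx ∧
      (o.map Prod.snd).sum = (b.map Prod.snd).sum + b.length * dy := by
  have hinj : Function.Injective (fun p : Int × Int => (p.1 + dx, p.2 + dy)) := by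
    rintro ⟨x1, x2⟩ ⟨y1, y2⟩ h
    rw [Prod.mk.injEq] at h ⊢
    omega
  have hperm : o.Perm (b.map (fun p => (p.1 + dx, p.2 + dy))) := by
    rw [List.perm_ext_iff_of_nodup ho (hb.map hinj)]
    intro a
    constructor
    · intro ha
      refine List.mem_map.mpr ⟨(a.1 - dx, a.2 - dy), ht.2 a ha, ?_⟩
      rw [Prod.mk.injEq]; omega
    · intro hm
      obtain ⟨p, hp, rfl⟩ := List.mem_map.mp hm
      exact ht.1 p hp
  constructor
  · have h1 := (hperm.map Prod.fst).sum_eq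
    rw [List.map_map] at h1
    have h2 : (Prod.fst ∘ fun p : Int × Int => (p.1 + dx, p.2 + dy)) =
        fun p : Int × Int => p.1 + dx := rfl
    rw [h2, PySem.List.sum_map_add_int b Prod.fst (fun _ => dx),
      PySem.List.sum_map_const_int b dx] at h1
    exact h1
  · have h1 := (hperm.map Prod.snd).sum_eq
    rw [List.map_map] at h1
    have h2 : (Prod.snd ∘ fun p : Int × Int => (p.1 + dx, p.2 + dy)) =
        fun p : Int × Int => p.2 + dy := rfl
    rw [h2, PySem.List.sum_map_add_int b Prod.snd (fun _ => dy),
      PySem.List.sum_map_const_int b dy] at h1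
    exact h1

-- under a translation, A's centroid offset recovers exactly that translation
theorem central_shift (b o : List (Int × Int)) (hb : b.Nodup) (ho : o.Nodup)
    (hne : b ≠ []) (hlen : b.length = o.length) (dx dy : Int) (ht : pvTrans b o dx dy) :
    get_most_central_dot o = ((get_most_central_dot b).1 + dx, (get_most_central_dot b).2 + dy) := by
  obtain ⟨hsx, hsy⟩ := sum_shift b o hb ho dx dy ht
  have hpos : (0 : Int) < b.length := by
    cases b with
    | nil => exact absurd rfl hne
    | cons _ _ => simp
  unfold get_most_central_dot
  simp only [PySem.Set.len, PySem.List.foldl_add, zero_add, ← hlen]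
  rw [hsx, hsy, Prod.mk.injEq,
    PySem.Int.floordiv_eq_ediv_of_pos hpos, PySem.Int.floordiv_eq_ediv_of_pos hpos,
    PySem.Int.floordiv_eq_ediv_of_pos hpos, PySem.Int.floordiv_eq_ediv_of_pos hpos,
    mul_comm ((b.length : Int)) dx, mul_comm ((b.length : Int)) dy,
    Int.add_mul_ediv_right _ dx (ne_of_gt hpos), Int.add_mul_ediv_right _ dy (ne_of_gt hpos)]
  exact ⟨rfl, rfl⟩

-- evaluation of the two ports in the interesting branch (sets unequal, sizes equal)
theorem A_eval (b o : List (Int × Int)) (hne : PySem.Set.equal b o = false)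
    (hlen : b.length = o.length) :
    are_equivalent b o = PySem.Set.equal
      (o.foldl (fun s d =>
        PySem.Set.add s (d.1 - ((get_most_central_dot o).1 - (get_most_central_dot b).1),
                         d.2 - ((get_most_central_dot o).2 - (get_most_central_dot b).2)))
        PySem.Set.empty) b := by
  unfold are_equivalent
  simp only [hne, Bool.false_eq_true, if_false, PySem.Set.len, hlen, beq_self_eq_true, if_true]
  cases h : PySem.Set.equal
      (o.foldl (fun s d =>
        PySem.Set.add s (d.1 - ((get_most_central_dot o).1 - (get_most_central_dot b).1),
                         d.2 - ((get_most_central_dot o).2 - (get_most_central_dot b).2)))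
        PySem.Set.empty) b <;> rfl

theorem B_eval (b o : List (Int × Int)) (hne : PySem.Set.equal b o = false)
    (hlen : b.length = o.length) :
    are_equivalent_alt b o = PySem.Set.equal (bNorm b) (bNorm o) := by
  unfold are_equivalent_alt
  simp only [hne, Bool.false_eq_true, if_false, PySem.Set.len, hlen, beq_self_eq_true, if_true]

theorem nonempty_of_not_equal_of_len {b o : List (Int × Int)}
    (hne : PySem.Set.equal b o = false) (hlen : b.length = o.length) : b ≠ [] ∧ o ≠ [] := by
  refine ⟨fun hb => ?_, fun ho => ?_⟩
  · subst hb
    cases o with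
    | nil => exact absurd hne (by decide)
    | cons _ _ => simp at hlen
  · subst ho
    cases b with
    | nil => exact absurd hne (by decide)
    | cons _ _ => simp at hlen

-- ===== VERDICT (by name: the statement is the Claim_ definition above) =====
theorem are_equivalent_spec : Claim_equal_are_equivalent := by
  intro block other_block _ hpre
  obtain ⟨hnb, hno, hlen⟩ := hpre
  unfold Spec_are_equivalent
  cases he : PySem.Set.equal block other_block with
  | true =>
    unfold are_equivalent are_equivalent_alt
    simp [he]
  | false =>
    obtain ⟨hb, ho⟩ := nonempty_of_not_equal_of_len he hlen
    rw [A_eval block other_block he hlen, B_eval block other_block he hlen]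
    cases hB : PySem.Set.equal (bNorm block) (bNorm other_block) with
    | true =>
      obtain ⟨dx, dy, ht⟩ := (trans_iff_norm block other_block hb ho).mpr hB
      have hc := central_shift block other_block hnb hno hb hlen dx dy ht
      rw [hc]
      simp only [add_sub_cancel_left]
      exact (moved_equal_iff block other_block dx dy).mpr ht
    | false =>
      cases hM : PySem.Set.equal
          (other_block.foldl (fun s d =>
            PySem.Set.add s
              (d.1 - ((get_most_central_dot other_block).1 - (get_most_central_dot block).1),
               d.2 - ((get_most_central_dot other_block).2 - (get_most_central_dot block).2)))
            PySem.Set.empty) block with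
      | false => rfl
      | true =>
        have ht := (moved_equal_iff block other_block _ _).mp hM
        have := (trans_iff_norm block other_block hb ho).mp ⟨_, _, ht⟩
        rw [this] at hB
        exact absurd hB (by simp)
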